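-- pv_equiv track=rewrite | github.com/monad-one/cppbind | src/iegen/converter/kotlin.py | get_jni_func_name
-- ===== SOURCE A (Python) =====
-- def get_jni_func_name(package_name, class_name, template_suffix, method_name, args_type_name=None):
--     def fix_name(name):
--         for s, r in [('_', '_1'), ('.', '_'), (';', '_2'), ('[', '_3')]:
--             name = name.replace(s, r)
--         return name
--
--     args_type_signature = dict(
--         jboolean='Z',
--         jbyte='B',
--         jchar='C',
--         jshort='S',
--         jint='I',
--         jlong='J',
--         jfloat='F',
--         jdouble='D',
--         jobject='Ljava_lang_Object_2',
--         jstring='Ljava_lang_String_2',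
--     )
--     package_name = fix_name(package_name)
--     class_name = fix_name(class_name)
--     method_name = fix_name(method_name)
--     if template_suffix:
--         class_name += fix_name(template_suffix)
--     if args_type_name is None or any([a not in args_type_signature for a in args_type_name]):
--         return f'Java_{package_name}_{class_name}_{method_name}'
--     else:
--         return f'Java_{package_name}_{class_name}_{method_name}__\
-- {"".join([args_type_signature[arg] for arg in args_type_name])}'
-- ===== SOURCE B (Python) =====
-- _MAP = {'_': '_1', '.': '_', ';': '_2', '[': '_3'}
--
-- _SIG = {
--     'jboolean': 'Z', 'jbyte': 'B', 'jchar': 'C', 'jshort': 'S', 'jint': 'I',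
--     'jlong': 'J', 'jfloat': 'F', 'jdouble': 'D',
--     'jobject': 'Ljava_lang_Object_2', 'jstring': 'Ljava_lang_String_2',
-- }
--
--
-- def _signature(args, i=0):
--     # recursive one-pass builder: None as soon as an unknown type is seen
--     if i == len(args):
--         return ''
--     code = _SIG.get(args[i])
--     if code is None:
--         return None
--     rest = _signature(args, i + 1)
--     if rest is None:
--         return None
--     return code + rest
--
--
-- def get_jni_func_name(package_name, class_name, template_suffix, method_name, args_type_name=None):
--     # one fused character-level pass over all name parts: each character is
--     # mangled on the fly instead of rewriting whole strings in staged passes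
--     pieces = ['Java']
--     for part in (package_name, class_name + (template_suffix or ''), method_name):
--         pieces.append('_')
--         for ch in part:
--             pieces.append(_MAP.get(ch, ch))
--     if args_type_name is not None:
--         sig = _signature(args_type_name)
--         if sig is not None:
--             pieces.append('__')
--             pieces.append(sig)
--     return ''.join(pieces)
-- ===== Notes on version B (the rewrite author's own statement) =====
-- stated objective: alternative
-- what changed: B builds the mangled name in one fused character-level pass that emits each mangled character into a pieces accumulator (instead of A's four sequential whole-string replace passes per name), and replaces A's validate-then-build double pass over args_type_name with a single recursive builder that aborts with None on the first unknown type.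
import Mathlib
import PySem

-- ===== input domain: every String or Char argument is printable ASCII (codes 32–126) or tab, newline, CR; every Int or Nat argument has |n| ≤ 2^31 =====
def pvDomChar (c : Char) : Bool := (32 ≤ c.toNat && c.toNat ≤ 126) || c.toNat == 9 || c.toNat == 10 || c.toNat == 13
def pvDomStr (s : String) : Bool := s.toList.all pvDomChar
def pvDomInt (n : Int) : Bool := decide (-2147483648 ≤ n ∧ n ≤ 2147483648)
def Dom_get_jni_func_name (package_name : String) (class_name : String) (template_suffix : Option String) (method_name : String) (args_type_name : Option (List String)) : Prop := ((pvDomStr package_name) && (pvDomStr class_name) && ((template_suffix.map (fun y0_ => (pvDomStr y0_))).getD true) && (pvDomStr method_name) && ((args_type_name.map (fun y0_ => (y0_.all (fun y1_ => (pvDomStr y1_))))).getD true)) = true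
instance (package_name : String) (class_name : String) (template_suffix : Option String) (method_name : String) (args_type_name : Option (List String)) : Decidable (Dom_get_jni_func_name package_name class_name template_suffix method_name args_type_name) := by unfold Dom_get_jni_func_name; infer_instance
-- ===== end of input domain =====

-- B fuses A's staged whole-string rewrites into one character-level pass that emits the mangled
-- name piece by piece, and builds the signature with a single recursive pass that aborts on an
-- unknown type instead of A's validate-then-build double pass (alternative decomposition, same cost).


-- the constant table args_type_signature / _SIG (pure data, used by both ports)
def pvSig : PySem.Dict String String := PySem.Dict.ofList
  [("jboolean", "Z"), ("jbyte", "B"), ("jchar", "C"), ("jshort", "S"), ("jint", "I"),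
   ("jlong", "J"), ("jfloat", "F"), ("jdouble", "D"),
   ("jobject", "Ljava_lang_Object_2"), ("jstring", "Ljava_lang_String_2")]

-- ===== PORT A =====
-- fix_name: the for-loop of four sequential whole-string replaces, as a fold over the pair list
def pvFixA (name : String) : String :=
  [("_", "_1"), (".", "_"), (";", "_2"), ("[", "_3")].foldl
    (fun n (p : String × String) => PySem.Str.replace n p.1 p.2) name

def get_jni_func_name (package_name : String) (class_name : String) (template_suffix : Option String) (method_name : String) (args_type_name : Option (List String)) : String :=
  let p := pvFixA package_name
  let c := pvFixA class_name
  let m := pvFixA method_name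
  -- `if template_suffix:` — truthy iff it is some nonempty string
  let c := if (template_suffix.getD "") ≠ "" then c ++ pvFixA (template_suffix.getD "") else c
  match args_type_name with
  | none => "Java_" ++ p ++ "_" ++ c ++ "_" ++ m
  | some args =>
    if args.any (fun a => !(pvSig.contains a)) then
      "Java_" ++ p ++ "_" ++ c ++ "_" ++ m
    else
      -- args_type_signature[arg]: every arg is present in this branch, so getD "" is never taken
      "Java_" ++ p ++ "_" ++ c ++ "_" ++ m ++ "__" ++
        PySem.Str.join "" (args.map (fun a => (pvSig.get? a).getD ""))

-- ===== PORT B =====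
-- _MAP.get(ch, ch): the per-character mangling map of Source B
def pvMapChar (c : Char) : String :=
  if c = '_' then "_1"
  else if c = '.' then "_"
  else if c = ';' then "_2"
  else if c = '[' then "_3"
  else String.ofList [c]

-- _signature: recursive one-pass builder, None as soon as an unknown type is seen
def pvSignature : List String → Option String
  | [] => some ""
  | a :: rest =>
    match pvSig.get? a with
    | none => none
    | some code =>
      match pvSignature rest with
      | none => none
      | some s => some (code ++ s)

def get_jni_func_name_alt (package_name : String) (class_name : String) (template_suffix : Option String) (method_name : String) (args_type_name : Option (List String)) : String :=
  -- one fused character-level pass over all name parts, appending pieces to an accumulator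
  let pieces : List String := ["Java"]
  let pieces := [package_name, class_name ++ template_suffix.getD "", method_name].foldl
    (fun acc part => part.toList.foldl (fun a ch => a ++ [pvMapChar ch]) (acc ++ ["_"])) pieces
  let pieces :=
    match args_type_name with
    | none => pieces
    | some args =>
      match pvSignature args with
      | none => pieces
      | some sig => pieces ++ ["__", sig]
  PySem.Str.join "" pieces

-- ===== PRECONDITION & SPEC =====
def Spec_get_jni_func_name (package_name : String) (class_name : String) (template_suffix : Option String) (method_name : String) (args_type_name : Option (List String)) (out : String) : Prop := out = get_jni_func_name_alt package_name class_name template_suffix method_name args_type_name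
instance (package_name : String) (class_name : String) (template_suffix : Option String) (method_name : String) (args_type_name : Option (List String)) (out : String) : Decidable (Spec_get_jni_func_name package_name class_name template_suffix method_name args_type_name out) := by unfold Spec_get_jni_func_name; infer_instance

-- ===== CLAIM (what is proved, stated in full; the proofs are below) =====
def Claim_equal_get_jni_func_name : Prop := ∀ (package_name : String) (class_name : String) (template_suffix : Option String) (method_name : String) (args_type_name : Option (List String)), Dom_get_jni_func_name package_name class_name template_suffix method_name args_type_name → Spec_get_jni_func_name package_name class_name template_suffix method_name args_type_name (get_jni_func_name package_name class_name template_suffix method_name args_type_name)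

-- ===== LEMMAS AND PROOFS =====

-- single-character replace is a flatMap over the characters
theorem replace_go_single (o : Char) (new : List Char) :
    ∀ (l : List Char) (fuel : Nat) (acc : List Char), l.length ≤ fuel →
      PySem.Chars.replace.go [o] new fuel l acc =
        acc.reverse ++ l.flatMap (fun c => if c = o then new else [c]) := by
  intro l
  induction l with
  | nil =>
    intro fuel acc _
    cases fuel <;> simp [PySem.Chars.replace.go]
  | cons c t ih =>
    intro fuel acc h
    cases fuel with
    | zero => simp at h
    | succ fuel =>
      rw [PySem.Chars.replace.go]
      by_cases hc : c = o
      · subst hc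
        simp only [List.isPrefixOf, BEq.rfl, Bool.true_and, if_pos, List.length_cons,
          List.length_nil, List.drop_succ_cons, List.drop_zero]
        rw [ih fuel _ (by simpa using h)]
        simp
      · have hp : ([o].isPrefixOf (c :: t)) = false := by
          simp only [List.isPrefixOf, Bool.and_true]
          exact beq_eq_false_iff_ne.mpr (fun h' => hc h'.symm)
        rw [hp]
        simp only [Bool.false_eq_true, if_false]
        rw [ih fuel _ (by simpa using h)]
        simp [hc]

theorem replace_single (o : Char) (new : List Char) (l : List Char) :
    PySem.Chars.replace l [o] new = l.flatMap (fun c => if c = o then new else [c]) := by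
  rw [PySem.Chars.replace, replace_go_single o new l l.length [] le_rfl,
    if_neg (by simp), List.reverse_nil, List.nil_append]

-- A's four staged replaces produce exactly B's per-character mangling
theorem fixA_toList (s : String) :
    (pvFixA s).toList = s.toList.flatMap (fun c => (pvMapChar c).toList) := by
  have e1 : ("_" : String).toList = ['_'] := by decide
  have e2 : ("_1" : String).toList = ['_', '1'] := by decide
  have e3 : ("." : String).toList = ['.'] := by decide
  have e4 : (";" : String).toList = [';'] := by decide
  have e5 : ("_2" : String).toList = ['_', '2'] := by decide
  have e6 : ("[" : String).toList = ['['] := by decide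
  have e7 : ("_3" : String).toList = ['_', '3'] := by decide
  simp only [pvFixA, List.foldl, PySem.Str.toList_replace, e1, e2, e3, e4, e5, e6, e7]
  simp only [replace_single]
  simp only [List.flatMap_assoc]
  congr 1
  funext c
  by_cases h1 : c = '_'
  · simp [h1, pvMapChar, e2]
  by_cases h2 : c = '.'
  · simp [h2, pvMapChar, e1]
  by_cases h3 : c = ';'
  · simp [h3, pvMapChar, e5]
  by_cases h4 : c = '['
  · simp [h4, pvMapChar, e7]
  · simp [pvMapChar, h1, h2, h3, h4]

-- B's abort-early recursion vs A's validate pass + build pass over args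
theorem pvSignature_none (args : List String)
    (h : args.any (fun a => !(pvSig.contains a)) = true) :
    pvSignature args = none := by
  induction args with
  | nil => simp at h
  | cons a t ih =>
    simp only [List.any_cons, Bool.or_eq_true, Bool.not_eq_eq_eq_not, Bool.not_true] at h
    rcases h with h | h
    · have : pvSig.get? a = none := (PySem.Dict.get?_eq_none_iff_contains pvSig a).mpr h
      simp [pvSignature, this]
    · rcases hg : pvSig.get? a with _ | v <;> simp [pvSignature, hg, ih h]

theorem pvSignature_all (args : List String)
    (h : args.any (fun a => !(pvSig.contains a)) = false) :
    ∃ s, pvSignature args = some s ∧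
      s.toList = (args.map (fun a => ((pvSig.get? a).getD "").toList)).flatten := by
  induction args with
  | nil => exact ⟨"", rfl, by decide⟩
  | cons a t ih =>
    simp only [List.any_cons, Bool.or_eq_false_iff, Bool.not_eq_false'] at h
    obtain ⟨ha, ht⟩ := h
    obtain ⟨s, hs, hsl⟩ := ih ht
    obtain ⟨v, hv⟩ : ∃ v, pvSig.get? a = some v := by
      rcases hg : pvSig.get? a with _ | v
      · rw [PySem.Dict.get?_eq_none_iff_contains] at hg
        rw [ha] at hg; cases hg
      · exact ⟨v, rfl⟩
    refine ⟨v ++ s, by simp [pvSignature, hv, hs], ?_⟩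
    simp [hv, hsl]

theorem inter_nil (l : List (List Char)) : ([] : List Char).intercalate l = l.flatten := by
  induction l with
  | nil => rfl
  | cons a t ih =>
    cases t with
    | nil => simp [List.intercalate]
    | cons b u =>
      simp [List.intercalate] at *
      simpa [List.intersperse] using ih

-- ''.join of string pieces is the flattening of their character lists
theorem join_empty_toList (l : List String) :
    (PySem.Str.join "" l).toList = (l.map String.toList).flatten := by
  simp [PySem.Str.toList_join, PySem.Chars.join, inter_nil]

-- A's mangled base name equals B's piece accumulator, at the character level
theorem base_eq (p c m : String) (ts : Option String) :
    ("Java_" ++ pvFixA p ++ "_" ++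
      (if (ts.getD "") ≠ "" then pvFixA c ++ pvFixA (ts.getD "") else pvFixA c) ++ "_" ++
      pvFixA m).toList =
    (([p, c ++ ts.getD "", m].foldl
      (fun acc part => part.toList.foldl (fun a ch => a ++ [pvMapChar ch]) (acc ++ ["_"]))
      ["Java"]).map String.toList).flatten := by
  simp only [List.foldl, PySem.List.foldl_append_singleton_eq_map]
  have hj : ("Java" : String).toList = ['J','a','v','a'] := by decide
  have hu : ("_" : String).toList = ['_'] := by decide
  by_cases h : (ts.getD "") = ""
  · simp [h, fixA_toList, String.toList_append, List.flatMap, Function.comp_def, hj, hu]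
  · simp [h, fixA_toList, String.toList_append, List.flatMap, Function.comp_def, hj, hu]

theorem port_eq (p c : String) (ts : Option String) (m : String) (at_ : Option (List String)) :
    get_jni_func_name p c ts m at_ = get_jni_func_name_alt p c ts m at_ := by
  unfold get_jni_func_name get_jni_func_name_alt
  rw [← String.toList_inj]
  cases at_ with
  | none =>
    dsimp only
    simp only [join_empty_toList]
    exact base_eq p c m ts
  | some args =>
    dsimp only
    by_cases h : args.any (fun a => !(pvSig.contains a)) = true
    · rw [pvSignature_none args h, if_pos h]
      simp only [join_empty_toList]
      exact base_eq p c m ts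
    · have h' := eq_false_of_ne_true h
      obtain ⟨s, hs, hsl⟩ := pvSignature_all args h'
      rw [hs, if_neg h]
      simp only [join_empty_toList, List.map_append, List.flatten_append,
        String.toList_append, base_eq p c m ts, join_empty_toList]
      have hd : ("__" : String).toList = ['_','_'] := by decide
      simp [hd, hsl, List.map_map, Function.comp_def]

-- ===== VERDICT (by name: the statement is the Claim_ definition above) =====
theorem get_jni_func_name_spec : Claim_equal_get_jni_func_name := by
  intro p c ts m at_ _
  unfold Spec_get_jni_func_name
  exact port_eq p c ts m at_
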